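-- pv_equiv track=rewrite | github.com/mikeg0321/Reytech-RFQ | tests/test_oracle_win_rate.py | _normalize_agency
-- ===== SOURCE A (Python) =====
-- def _normalize_agency(raw):
--     s = (raw or "").strip().lower()
--     if not s:
--         return ""
--     out = "".join(c if c.isalnum() else " " for c in s)
--     tokens = [t for t in out.split() if t]
--     stop = {"of", "the", "and", "for", "ca", "california", "dept",
--             "department", "inc", "co", "company", "corp", "corporation",
--             "rehab", "rehabilitation"}
--     tokens = [t for t in tokens if t not in stop]
--     return " ".join(tokens)
-- ===== SOURCE B (Python) =====
-- def _normalize_agency(raw):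
--     s = (raw or "").strip().lower()
--     if not s:
--         return ""
--     stop = {"of", "the", "and", "for", "ca", "california", "dept",
--             "department", "inc", "co", "company", "corp", "corporation",
--             "rehab", "rehabilitation"}
--     words = []
--     cur = ""
--     for c in s:
--         if c.isalnum():
--             cur += c
--         else:
--             if cur and cur not in stop:
--                 words.append(cur)
--             cur = ""
--     if cur and cur not in stop:
--         words.append(cur)
--     return " ".join(words)
-- ===== Notes on version B (the rewrite author's own statement) =====
-- stated objective: alternative
-- what changed: A masks non-alphanumerics to spaces, splits the whole string, then filters empties and stopwords in separate passes; B tokenizes in a single character scan with a word buffer, filtering stopwords as each word completes.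
import Mathlib
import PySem

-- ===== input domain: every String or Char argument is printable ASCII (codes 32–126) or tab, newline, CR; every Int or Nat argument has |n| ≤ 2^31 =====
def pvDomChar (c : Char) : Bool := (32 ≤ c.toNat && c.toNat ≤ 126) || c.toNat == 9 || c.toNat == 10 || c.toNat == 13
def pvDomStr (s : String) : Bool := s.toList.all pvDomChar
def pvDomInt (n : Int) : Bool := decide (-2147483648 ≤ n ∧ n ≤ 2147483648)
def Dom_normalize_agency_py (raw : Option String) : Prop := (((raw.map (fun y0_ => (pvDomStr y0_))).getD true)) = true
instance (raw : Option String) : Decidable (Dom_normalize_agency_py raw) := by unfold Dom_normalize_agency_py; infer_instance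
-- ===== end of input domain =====

-- B replaces A's mask-then-split-then-double-filter pipeline by a single left-to-right
-- scan with a word buffer that filters stopwords as each word is completed (objective: alternative).

-- ===== PORT A =====
def pvStop : PySem.Set String :=
  PySem.Set.ofList ["of", "the", "and", "for", "ca", "california", "dept",
    "department", "inc", "co", "company", "corp", "corporation", "rehab", "rehabilitation"]

def normalize_agency_py (raw : Option String) : String :=
  let s := PySem.Str.lower (PySem.Str.strip (raw.getD ""))
  if s = "" then ""
  else
    let out := PySem.Str.join "" (s.toList.map (fun c =>
      if PySem.Chars.isalnum c then String.ofList [c] else " "))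
    let tokens := (PySem.Str.split₀ out).filter (fun t => t != "")
    let tokens2 := tokens.filter (fun t => !(pvStop.contains t))
    PySem.Str.join " " tokens2

-- ===== PORT B =====
def pvStopAlt : PySem.Set String :=
  PySem.Set.ofList ["of", "the", "and", "for", "ca", "california", "dept",
    "department", "inc", "co", "company", "corp", "corporation", "rehab", "rehabilitation"]

-- the for-loop of Source B: state = (cur buffer, words so far)
def altGo : List Char → List Char → List String → List String
  | [], cur, words =>
      if cur ≠ [] ∧ !(pvStopAlt.contains (String.ofList cur)) then words ++ [String.ofList cur] else words
  | c :: rest, cur, words =>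
      if PySem.Chars.isalnum c then altGo rest (cur ++ [c]) words
      else altGo rest []
        (if cur ≠ [] ∧ !(pvStopAlt.contains (String.ofList cur)) then words ++ [String.ofList cur] else words)

def normalize_agency_py_alt (raw : Option String) : String :=
  let s := PySem.Str.lower (PySem.Str.strip (raw.getD ""))
  if s = "" then ""
  else PySem.Str.join " " (altGo s.toList [] [])

-- ===== PRECONDITION & SPEC =====
def Spec_normalize_agency_py (raw : Option String) (out : String) : Prop := out = normalize_agency_py_alt raw
instance (raw : Option String) (out : String) : Decidable (Spec_normalize_agency_py raw out) := by unfold Spec_normalize_agency_py; infer_instance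

-- ===== CLAIM (what is proved, stated in full; the proofs are below) =====
def Claim_equal_normalize_agency_py : Prop := ∀ (raw : Option String), Dom_normalize_agency_py raw → Spec_normalize_agency_py raw (normalize_agency_py raw)

-- ===== LEMMAS AND PROOFS =====

-- the character mask A applies, at char level
def pvMask (c : Char) : Char := if PySem.Chars.isalnum c then c else ' '

-- A's combined token filter, at String level
def pvP : String → Bool := fun t => (!(pvStop.contains t)) && (t != "")

theorem pv_alnum_not_space (c : Char) (h : PySem.Chars.isalnum c = true) :
    PySem.Chars.isspace c = false := by
  simp only [PySem.Chars.isalnum, PySem.Chars.isalpha, PySem.Chars.isdigit,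
        PySem.Chars.isupper, PySem.Chars.islower, Char.le_def,
        UInt32.le_iff_toNat_le, Bool.or_eq_true, Bool.and_eq_true, decide_eq_true_eq,
        Char.reduceVal, UInt32.reduceToNat] at h
  simp only [PySem.Chars.isspace, Char.toNat] at h ⊢
  simp only [Bool.or_eq_false_iff, Bool.and_eq_false_iff, decide_eq_false_iff_not]
  omega

theorem pv_altGo_ws (s : List Char) (cur : List Char) (ws : List String) :
    altGo s cur ws = ws ++ altGo s cur [] := by
  induction s generalizing cur ws with
  | nil => simp [altGo]; split <;> simp
  | cons c rest ih =>
      simp only [altGo]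
      split
      · exact ih _ _
      · by_cases hP : cur ≠ [] ∧ (!pvStopAlt.contains (String.ofList cur)) = true
        · simp only [if_pos hP, List.nil_append]
          rw [ih [] (ws ++ [String.ofList cur]), ih [] [String.ofList cur]]
          simp
        · simp only [if_neg hP]
          exact ih [] ws

theorem pv_stop_eq : pvStopAlt = pvStop := rfl

theorem pv_emit (cur : List Char) :
    ([String.ofList cur].filter pvP)
      = (if cur ≠ [] ∧ (!pvStopAlt.contains (String.ofList cur)) = true
         then [String.ofList cur] else []) := by
  have hP : pvP (String.ofList cur) = ((!pvStop.contains (String.ofList cur)) && decide (cur ≠ [])) := by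
    by_cases hc : cur = [] <;> simp [pvP, hc, bne, String.ofList_eq_empty_iff]
  rw [List.filter_cons, List.filter_nil, hP, pv_stop_eq]
  by_cases hc : cur = []
  · subst hc; simp
  · by_cases hm : pvStop.contains (String.ofList cur) = true <;> simp [hc]

theorem pv_main (s : List Char) (cur : List Char) (acc : List (List Char)) :
    ((PySem.Chars.split₀.go (s.map pvMask) cur.reverse acc).map String.ofList).filter pvP
      = ((acc.reverse.map String.ofList).filter pvP) ++ altGo s cur [] := by
  induction s generalizing cur acc with
  | nil =>
    simp only [List.map_nil, PySem.Chars.split₀.go, altGo]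
    by_cases hc : cur = []
    · subst hc; simp
    · have h1 : cur.reverse.isEmpty = false := by simp [hc]
      simp only [h1, Bool.false_eq_true, if_false, List.reverse_cons, List.reverse_reverse,
        List.map_append, List.filter_append, List.map_cons, List.map_nil]
      rw [pv_emit]
      simp
  | cons c rest ih =>
    by_cases ha : PySem.Chars.isalnum c = true
    · have hs := pv_alnum_not_space c ha
      simp only [List.map_cons, pvMask, if_pos ha, PySem.Chars.split₀.go, hs,
        Bool.false_eq_true, if_false]
      have hrw : c :: cur.reverse = (cur ++ [c]).reverse := by simp
      rw [hrw, ih]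
      simp [altGo, ha]
    · have hsp : PySem.Chars.isspace ' ' = true := by decide
      simp only [List.map_cons, pvMask, if_neg ha, PySem.Chars.split₀.go, hsp, if_true]
      by_cases hc : cur = []
      · subst hc
        simp only [List.reverse_nil, List.isEmpty_nil, if_true]
        rw [show (List.nil (α := Char)) = (List.nil (α := Char)).reverse from rfl, ih]
        simp [altGo, ha]
      · have h1 : cur.reverse.isEmpty = false := by simp [hc]
        simp only [h1, Bool.false_eq_true, if_false, List.reverse_reverse]
        rw [show ([] : List Char) = (List.reverse []) from rfl, ih]
        simp only [altGo, if_neg ha, List.reverse_cons, List.map_append, List.filter_append,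
          List.map_cons, List.map_nil]
        rw [pv_emit]
        conv_rhs => rw [pv_altGo_ws]
        simp

theorem pv_outToList (s : List Char) :
    (PySem.Str.join "" (s.map (fun c =>
      if PySem.Chars.isalnum c then String.ofList [c] else " "))).toList
      = s.map pvMask := by
  rw [PySem.Str.toList_join, List.map_map]
  have h : (String.toList ∘ fun c => if PySem.Chars.isalnum c then String.ofList [c] else " ")
      = fun c => [pvMask c] := by
    funext c
    by_cases ha : PySem.Chars.isalnum c = true <;> simp [ha, pvMask]
  rw [h, show (s.map fun c => [pvMask c]) = (s.map pvMask).map (fun x => [x]) by simp [List.map_map]]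
  exact PySem.Chars.join_nil_singletons _

theorem pv_tokens (s : List Char) :
    ((PySem.Chars.split₀.go (s.map pvMask) [] []).map String.ofList).filter pvP
      = altGo s [] [] := by
  have h := pv_main s [] []
  simpa using h

theorem normalize_agency_py_spec : Claim_equal_normalize_agency_py := by
  unfold Claim_equal_normalize_agency_py Spec_normalize_agency_py
  intro raw _
  simp only [normalize_agency_py, normalize_agency_py_alt]
  by_cases hs : PySem.Str.lower (PySem.Str.strip (raw.getD "")) = ""
  · simp [hs]
  · simp only [hs, if_false]
    refine congrArg (PySem.Str.join " ") ?_
    rw [PySem.Str.split₀, pv_outToList, List.filter_filter]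
    exact pv_tokens _
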